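-- pv_equiv track=rewrite | github.com/labgem/PPanGGOLiN | ppanggolin/formats/writeFlatGenomes.py | encode_attributes
-- ===== SOURCE A (Python) =====
-- from typing import List, Dict, Set, Tuple
--
-- def encode_attribute_val(product: str) -> str:
--     """
--     Encode special characters forbidden in column 9 of the GFF3 format.
--
--     :param product: The input string to encode.
--     :return: The encoded string with special characters replaced.
--
--     Reference:
--     - GFF3 format requirement: https://github.com/The-Sequence-Ontology/Specifications/blob/master/gff3.md
--     - Code source taken from Bakta: https://github.com/oschwengers/bakta
--     """
--     product = str(product)
--     product = product.replace("%", "%25")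
--     product = product.replace(";", "%3B")
--     product = product.replace("=", "%3D")
--     product = product.replace("&", "%26")
--     product = product.replace(",", "%2C")
--     return product
--
-- def encode_attributes(attributes: List[Tuple]) -> str:
--     """
--     Encode a list of attributes in GFF3 format.
--
--     :param attributes: A list of attribute key-value pairs represented as tuples.
--     :return: The encoded attributes as a semicolon-separated string.
--     """
--     return ";".join(
--         [
--             f"{encode_attribute_val(k)}={encode_attribute_val(v)}"
--             for k, v in attributes
--             if str(v) != "" and v is not None
--         ]
--     )
-- ===== SOURCE B (Python) =====
-- def encode_attributes(attributes):
--     """Encode a list of attribute key-value pairs as a GFF3 semicolon-separated string.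
--
--     Single-pass table-driven encoding (one scan per string via a char->escape dict)
--     instead of five sequential str.replace rescans.
--     """
--     table = {'%': '%25', ';': '%3B', '=': '%3D', '&': '%26', ',': '%2C'}
--     parts = []
--     for k, v in attributes:
--         if v is None or str(v) == '':
--             continue
--         key = ''.join(table.get(c, c) for c in str(k))
--         val = ''.join(table.get(c, c) for c in str(v))
--         parts.append(key + '=' + val)
--     return ';'.join(parts)
-- ===== Notes on version B (the rewrite author's own statement) =====
-- stated objective: alternative
-- what changed: B replaces the five sequential whole-string str.replace rescans by one table-driven pass over each string (a char->escape dict and a single ''.join), and builds the filtered parts with an explicit accumulator loop instead of a filtered list comprehension.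
import Mathlib
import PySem

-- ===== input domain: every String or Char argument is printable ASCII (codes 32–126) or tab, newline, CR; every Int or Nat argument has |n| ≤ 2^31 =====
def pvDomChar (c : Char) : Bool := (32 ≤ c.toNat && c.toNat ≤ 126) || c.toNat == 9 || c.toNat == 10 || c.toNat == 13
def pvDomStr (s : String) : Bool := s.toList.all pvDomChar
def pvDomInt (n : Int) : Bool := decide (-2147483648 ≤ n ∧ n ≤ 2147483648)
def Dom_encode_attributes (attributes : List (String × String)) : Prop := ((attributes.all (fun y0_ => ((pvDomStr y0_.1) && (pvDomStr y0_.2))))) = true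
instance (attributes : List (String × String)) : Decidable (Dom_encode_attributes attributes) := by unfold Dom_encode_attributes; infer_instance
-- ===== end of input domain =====

-- B replaces A's five sequential whole-string replace passes by one table-driven pass per string
-- and an explicit accumulator loop; return values are proved identical on all inputs.

-- ===== PORT A =====
-- five sequential replace passes, exactly as A
def encode_attribute_val (product : String) : String :=
  let product := PySem.Str.replace product "%" "%25"
  let product := PySem.Str.replace product ";" "%3B"
  let product := PySem.Str.replace product "=" "%3D"
  let product := PySem.Str.replace product "&" "%26"
  let product := PySem.Str.replace product "," "%2C"
  product

-- list comprehension with filter; 'v is not None' is always true for a String v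
def encode_attributes (attributes : List (String × String)) : String :=
  PySem.Str.join ";"
    ((attributes.filter (fun kv => kv.2 ≠ "")).map
      (fun kv => encode_attribute_val kv.1 ++ "=" ++ encode_attribute_val kv.2))

-- ===== PORT B =====
-- the char -> escape table of Source B
def encTable : PySem.Dict Char String :=
  PySem.Dict.ofList [('%', "%25"), (';', "%3B"), ('=', "%3D"), ('&', "%26"), (',', "%2C")]

-- ''.join(table.get(c, c) for c in str(s))  — one pass over the characters
def encVal (s : String) : String :=
  PySem.Str.join "" (s.toList.map (fun c => PySem.Dict.getD encTable c (String.ofList [c])))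

-- explicit accumulator loop ('v is None' is always false for a String v)
def encode_attributes_alt (attributes : List (String × String)) : String :=
  PySem.Str.join ";"
    (attributes.foldl
      (fun parts kv => if kv.2 ≠ "" then parts ++ [encVal kv.1 ++ "=" ++ encVal kv.2] else parts)
      [])

-- ===== PRECONDITION & SPEC =====
def Spec_encode_attributes (attributes : List (String × String)) (out : String) : Prop := out = encode_attributes_alt attributes
instance (attributes : List (String × String)) (out : String) : Decidable (Spec_encode_attributes attributes out) := by unfold Spec_encode_attributes; infer_instance

-- ===== CLAIM (what is proved, stated in full; the proofs are below) =====
def Claim_equal_encode_attributes : Prop := ∀ (attributes : List (String × String)), Dom_encode_attributes attributes → Spec_encode_attributes attributes (encode_attributes attributes)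

-- ===== LEMMAS AND PROOFS =====

-- the per-character encoding B performs, on char lists
def encChar (c : Char) : List Char :=
  (PySem.Dict.getD encTable c (String.ofList [c])).toList

-- replace with a one-char pattern is a per-character flatMap
theorem replace_go_single (o : Char) (new : List Char) (l : List Char) :
    ∀ (fuel : Nat) (acc : List Char), l.length ≤ fuel →
      PySem.Chars.replace.go [o] new fuel l acc
        = acc.reverse ++ l.flatMap (fun c => if c = o then new else [c]) := by
  induction l with
  | nil =>
      intro fuel acc _
      cases fuel <;> simp [PySem.Chars.replace.go]
  | cons c t ih =>
      intro fuel acc h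
      cases fuel with
      | zero => simp at h
      | succ n =>
          by_cases hc : c = o
          · subst hc
            simp only [PySem.Chars.replace.go, List.isPrefixOf,
              beq_self_eq_true, Bool.true_and, if_pos, List.drop, List.length_cons]
            simp only [List.length_nil, List.drop_zero]
            rw [ih n (new.reverse ++ acc) (by simp at h; omega)]
            simp
          · have hpre : [o].isPrefixOf (c :: t) = false := by
              simp [List.isPrefixOf]; exact fun h => absurd h.symm hc
            simp only [PySem.Chars.replace.go, hpre, Bool.false_eq_true, if_false]
            rw [ih n (c :: acc) (by simp at h; omega)]
            simp [hc]

theorem replace_single (cs : List Char) (o : Char) (new : List Char) :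
    PySem.Chars.replace cs [o] new = cs.flatMap (fun c => if c = o then new else [c]) := by
  rw [PySem.Chars.replace]
  simp only [List.isEmpty_cons, Bool.false_eq_true, if_false]
  exact replace_go_single o new cs cs.length [] le_rfl

-- the five-pass chain and the one-pass table agree on every character
theorem chain_eq_encChar (c : Char) :
    List.flatMap (fun x =>
      List.flatMap (fun x =>
        List.flatMap (fun x =>
          List.flatMap (fun c => if c = ',' then ['%','2','C'] else [c])
            (if x = '&' then ['%','2','6'] else [x]))
          (if x = '=' then ['%','3','D'] else [x]))
        (if x = ';' then ['%','3','B'] else [x]))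
      (if c = '%' then ['%','2','5'] else [c]) = encChar c := by
  have htab : encTable = PySem.Dict.mk
      [('%', "%25"), (';', "%3B"), ('=', "%3D"), ('&', "%26"), (',', "%2C")] := by
    rw [encTable]; rfl
  by_cases h1 : c = '%'
  · subst h1
    simp [encChar, htab, PySem.Dict.getD, PySem.Dict.get?_mk_cons]
  by_cases h2 : c = ';'
  · subst h2
    simp [encChar, htab, PySem.Dict.getD, PySem.Dict.get?_mk_cons]
  by_cases h3 : c = '='
  · subst h3
    simp [encChar, htab, PySem.Dict.getD, PySem.Dict.get?_mk_cons]
  by_cases h4 : c = '&'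
  · subst h4
    simp [encChar, htab, PySem.Dict.getD, PySem.Dict.get?_mk_cons]
  by_cases h5 : c = ','
  · subst h5
    simp [encChar, htab, PySem.Dict.getD, PySem.Dict.get?_mk_cons]
  have e1 : ('%' == c) = false := beq_eq_false_iff_ne.mpr (fun h => h1 h.symm)
  have e2 : ((';' : Char) == c) = false := beq_eq_false_iff_ne.mpr (fun h => h2 h.symm)
  have e3 : (('=' : Char) == c) = false := beq_eq_false_iff_ne.mpr (fun h => h3 h.symm)
  have e4 : (('&' : Char) == c) = false := beq_eq_false_iff_ne.mpr (fun h => h4 h.symm)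
  have e5 : ((',' : Char) == c) = false := beq_eq_false_iff_ne.mpr (fun h => h5 h.symm)
  simp [h1, h2, h3, h4, h5, encChar, htab, PySem.Dict.getD,
    PySem.Dict.get?, e1, e2, e3, e4, e5]

-- joining with the empty separator is concatenation
theorem join_nil_eq_flatten (parts : List (List Char)) :
    PySem.Chars.join [] parts = parts.flatten := by
  induction parts with
  | nil => rfl
  | cons p ps ih =>
      cases ps with
      | nil => simp [PySem.Chars.join, List.intercalate]
      | cons q qs =>
          simp only [PySem.Chars.join, List.intercalate] at *
          simp [List.intersperse] at *
          simpa using ih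

-- the two value encoders agree
theorem encVal_eq (s : String) : encVal s = encode_attribute_val s := by
  apply String.toList_inj.mp
  rw [encVal, encode_attribute_val]
  simp only [PySem.Str.toList_join, PySem.Str.toList_replace]
  have hp : "%".toList = ['%'] := rfl
  have h1 : "%25".toList = ['%','2','5'] := rfl
  have h2 : ";".toList = [';'] := rfl
  have h3 : "%3B".toList = ['%','3','B'] := rfl
  have h4 : "=".toList = ['='] := rfl
  have h5 : "%3D".toList = ['%','3','D'] := rfl
  have h6 : "&".toList = ['&'] := rfl
  have h7 : "%26".toList = ['%','2','6'] := rfl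
  have h8 : ",".toList = [','] := rfl
  have h9 : "%2C".toList = ['%','2','C'] := rfl
  have h0 : "".toList = ([] : List Char) := rfl
  rw [hp, h1, h2, h3, h4, h5, h6, h7, h8, h9, h0]
  rw [replace_single, replace_single, replace_single, replace_single, replace_single]
  simp only [List.flatMap_assoc]
  rw [join_nil_eq_flatten, List.flatten_eq_flatMap]
  simp only [List.map_map, List.flatMap_map, Function.comp]
  refine List.flatMap_congr ?_
  intro c _
  simpa [encChar] using (chain_eq_encChar c).symm

-- B's accumulator loop unrolled: it is map over filter
theorem alt_foldl (attributes : List (String × String)) (init : List String) :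
    attributes.foldl
      (fun parts kv => if kv.2 ≠ "" then parts ++ [encVal kv.1 ++ "=" ++ encVal kv.2] else parts)
      init
    = init ++ (attributes.filter (fun kv => kv.2 ≠ "")).map
        (fun kv => encVal kv.1 ++ "=" ++ encVal kv.2) := by
  induction attributes generalizing init with
  | nil => simp
  | cons kv rest ih =>
      rw [List.foldl_cons]
      by_cases h : kv.2 = ""
      · rw [if_neg (not_not.mpr h), ih, List.filter_cons]
        simp [h]
      · rw [if_pos h, ih, List.filter_cons]
        simp [h]

-- ===== VERDICT (by name: the statement is the Claim_ definition above) =====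
theorem encode_attributes_spec : Claim_equal_encode_attributes := by
  intro attributes _
  unfold Spec_encode_attributes encode_attributes encode_attributes_alt
  rw [alt_foldl attributes []]
  rw [List.nil_append]
  refine congrArg (PySem.Str.join ";") ?_
  refine List.map_congr_left ?_
  intro kv _
  rw [encVal_eq, encVal_eq]
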